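-- pv_equiv track=rewrite | github.com/pypi-data/pypi-mirror-334 | packages/i3expo/i3expo-0.0.4.tar.gz/i3expo-0.0.4/i3expo/main.py | resolve_grid_layout
-- ===== SOURCE A (Python) =====
-- import math
--
-- def resolve_grid_layout(screen_w, screen_h, wss) -> list[int]:
--     grid = []
--     max_tiles_per_row = 3 if screen_w >= screen_h else 2  # TODO: resolve from ratio?
--
--     # TODO: need to start increasing max_nr_per_row as well from here?
--     l = len(wss)
--     rows = math.ceil(l/max_tiles_per_row)
--     while rows > 0:
--         tiles_on_row = math.ceil(l/rows)
--         grid.append(tiles_on_row)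
--         l -= tiles_on_row
--         rows -= 1
--
--     return grid
-- ===== SOURCE B (Python) =====
-- def resolve_grid_layout(screen_w, screen_h, wss) -> list[int]:
--     max_tiles_per_row = 3 if screen_w >= screen_h else 2
--     l = len(wss)
--     if l == 0:
--         return []
--     rows = -(-l // max_tiles_per_row)  # ceil(l / max_tiles_per_row)
--     q, r = divmod(l, rows)
--     return [q + 1] * r + [q] * (rows - r)
-- ===== Notes on version B (the rewrite author's own statement) =====
-- stated objective: faster
-- what changed: Replaces A's subtract-as-you-go while loop (recomputing ceil(remaining/remaining_rows) each Python-level iteration) with a closed-form balanced distribution: q, r = divmod(l, rows) and the list [q+1]*r + [q]*(rows-r) built by C-level list repetition.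
import Mathlib
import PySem

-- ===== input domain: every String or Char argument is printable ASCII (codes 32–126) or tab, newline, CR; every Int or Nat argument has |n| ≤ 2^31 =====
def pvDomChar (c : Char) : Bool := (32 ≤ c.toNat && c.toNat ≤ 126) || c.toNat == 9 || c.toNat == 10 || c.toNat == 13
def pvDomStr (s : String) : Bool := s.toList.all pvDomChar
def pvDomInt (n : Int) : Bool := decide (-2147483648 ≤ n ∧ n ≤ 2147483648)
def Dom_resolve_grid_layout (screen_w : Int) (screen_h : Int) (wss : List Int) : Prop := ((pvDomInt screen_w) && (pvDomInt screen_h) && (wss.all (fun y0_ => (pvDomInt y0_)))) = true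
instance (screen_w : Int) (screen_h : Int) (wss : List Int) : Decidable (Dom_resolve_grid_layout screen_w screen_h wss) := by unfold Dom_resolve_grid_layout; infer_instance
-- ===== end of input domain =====

-- B replaces A's subtract-as-you-go greedy loop by the closed-form balanced
-- distribution [q+1]*r ++ [q]*(rows-r) with (q, r) = divmod(l, rows); objective: simpler.

-- ===== PORT A =====
-- math.ceil(a/b): exact as the integer ceiling -((-a) // b) on all integer operands admitted here.
def pyCeilDiv (a b : Int) : Int := -(PySem.Int.floordiv (-a) b)

-- the `while rows > 0` loop: fuel = current value of `rows` (always ≥ 0 here)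
def gridLoop : Nat → Int → List Int → List Int
  | 0, _, grid => grid
  | n+1, l, grid =>
      let tiles_on_row := pyCeilDiv l ((n : Int) + 1)
      gridLoop n (l - tiles_on_row) (grid ++ [tiles_on_row])

def resolve_grid_layout (screen_w : Int) (screen_h : Int) (wss : List Int) : List Int :=
  let max_tiles_per_row : Int := if screen_w ≥ screen_h then 3 else 2
  let l : Int := wss.length
  let rows := pyCeilDiv l max_tiles_per_row
  gridLoop rows.toNat l []

-- ===== PORT B =====
def resolve_grid_layout_alt (screen_w : Int) (screen_h : Int) (wss : List Int) : List Int :=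
  let max_tiles_per_row : Int := if screen_w ≥ screen_h then 3 else 2
  let l : Int := wss.length
  if l = 0 then []
  else
    let rows := -(PySem.Int.floordiv (-l) max_tiles_per_row)
    let q := PySem.Int.floordiv l rows
    let r := PySem.Int.mod l rows
    List.replicate r.toNat (q + 1) ++ List.replicate (rows - r).toNat q

-- ===== PRECONDITION & SPEC =====
def Spec_resolve_grid_layout (screen_w : Int) (screen_h : Int) (wss : List Int) (out : List Int) : Prop := out = resolve_grid_layout_alt screen_w screen_h wss
instance (screen_w : Int) (screen_h : Int) (wss : List Int) (out : List Int) : Decidable (Spec_resolve_grid_layout screen_w screen_h wss out) := by unfold Spec_resolve_grid_layout; infer_instance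

-- ===== CLAIM (what is proved, stated in full; the proofs are below) =====
def Claim_equal_resolve_grid_layout : Prop := ∀ (screen_w : Int) (screen_h : Int) (wss : List Int), Dom_resolve_grid_layout screen_w screen_h wss → Spec_resolve_grid_layout screen_w screen_h wss (resolve_grid_layout screen_w screen_h wss)

-- ===== LEMMAS AND PROOFS =====

-- the balanced distribution, as a function of the Int rows value
def bal (rows l : Int) : List Int :=
  List.replicate (l % rows).toNat (l / rows + 1) ++ List.replicate (rows - l % rows).toNat (l / rows)

lemma pyCeilDiv_eq (l b : Int) (hb : 0 < b) :
    pyCeilDiv l b = l / b + (if l % b = 0 then 0 else 1) := by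
  rw [pyCeilDiv, PySem.Int.neg_floordiv_neg_eq_iff_of_pos hb]
  have h : b * (l / b) + l % b = l := Int.mul_ediv_add_emod l b
  have h2 := Int.emod_nonneg l (by omega : b ≠ 0)
  split_ifs with hr
  · constructor
    · have e1 : (l / b + 0 - 1) * b = b * (l / b) - b := by ring
      rw [e1]; linarith
    · have e1 : (l / b + 0) * b = b * (l / b) := by ring
      rw [e1]; linarith
  · have hr' : 0 < l % b := lt_of_le_of_ne h2 (Ne.symm hr)
    constructor
    · have e1 : (l / b + 1 - 1) * b = b * (l / b) := by ring
      rw [e1]; linarith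
    · have e1 : (l / b + 1) * b = b * (l / b) + b := by ring
      rw [e1]
      have h3 := Int.emod_lt_of_pos l hb
      linarith

lemma loop_eq_bal (n : Nat) : ∀ (l : Int) (grid : List Int), 0 ≤ l →
    gridLoop (n+1) l grid = grid ++ bal ((n : Int) + 1) l := by
  induction n with
  | zero =>
      intro l grid hl
      simp [gridLoop, bal, pyCeilDiv_eq l 1 (by omega)]
  | succ n ih =>
      intro l grid hl
      have hb : (0 : Int) < (n : Int) + 2 := by positivity
      have h : ((n : Int) + 2) * (l / ((n : Int) + 2)) + l % ((n : Int) + 2) = l :=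
        Int.mul_ediv_add_emod l ((n : Int) + 2)
      have h2 := Int.emod_nonneg l (by omega : ((n : Int) + 2) ≠ 0)
      have h3 := Int.emod_lt_of_pos l hb
      have hq : 0 ≤ l / ((n : Int) + 2) := Int.ediv_nonneg hl (by omega)
      set q := l / ((n : Int) + 2) with hqdef
      set r := l % ((n : Int) + 2) with hrdef
      have hq1 : 0 ≤ q * ((n : Int) + 1) := mul_nonneg hq (by positivity)
      have hceil := pyCeilDiv_eq l ((n : Int) + 2) hb
      rw [← hrdef, ← hqdef] at hceil
      have hc : (((n + 1 : Nat) : Int) + 1) = (n : Int) + 2 := by push_cast; ring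
      show gridLoop (n+1) (l - pyCeilDiv l (((n + 1 : Nat) : Int) + 1))
            (grid ++ [pyCeilDiv l (((n + 1 : Nat) : Int) + 1)]) = grid ++ bal (((n + 1 : Nat) : Int) + 1) l
      rw [hc]
      by_cases hr0 : r = 0
      · -- exact division: every row gets q
        have ht : pyCeilDiv l ((n : Int) + 2) = q := by rw [hceil, if_pos hr0, add_zero]
        have hl' : (0 : Int) ≤ l - q := by
          have e1 : l - q = q * ((n : Int) + 1) + r := by linear_combination -h
          linarith
        rw [ht, ih (l - q) (grid ++ [q]) hl']
        have huniq := (Int.ediv_emod_unique'' (a := l - q) (b := (n : Int) + 1)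
          (r := 0) (q := q) (by omega)).mpr
          ⟨by linear_combination h - hr0, le_refl 0, by rw [abs_of_pos (by omega : (0:Int) < (n:Int)+1)]; omega⟩
        simp only [bal, huniq.1, huniq.2, List.append_assoc, List.singleton_append]
        rw [← hrdef, ← hqdef, hr0]
        simp only [Int.toNat_zero, List.replicate_zero, List.nil_append, Int.sub_zero]
        congr 1
      · -- remainder r > 0: the first row gets q + 1
        have hrpos : 0 < r := lt_of_le_of_ne h2 (Ne.symm hr0)
        have ht : pyCeilDiv l ((n : Int) + 2) = q + 1 := by rw [hceil, if_neg hr0]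
        have hl' : (0 : Int) ≤ l - (q + 1) := by
          have e1 : l - (q + 1) = q * ((n : Int) + 1) + (r - 1) := by linear_combination -h
          linarith
        rw [ht, ih (l - (q + 1)) (grid ++ [q + 1]) hl']
        have huniq := (Int.ediv_emod_unique'' (a := l - (q + 1)) (b := (n : Int) + 1)
          (r := r - 1) (q := q) (by omega)).mpr
          ⟨by linear_combination h, by omega, by rw [abs_of_pos (by omega : (0:Int) < (n:Int)+1)]; omega⟩
        simp only [bal, huniq.1, huniq.2, List.append_assoc, List.singleton_append]
        rw [← hrdef, ← hqdef]
        congr 1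
        rw [show r.toNat = (r - 1).toNat + 1 by omega, List.replicate_succ]
        congr 3
        omega

lemma pyCeilDiv_pos (l b : Int) (hb : 0 < b) (hl : 0 < l) : 0 < pyCeilDiv l b := by
  rw [pyCeilDiv_eq l b hb]
  have h := Int.mul_ediv_add_emod l b
  have h2 := Int.emod_nonneg l (by omega : b ≠ 0)
  have hq := Int.ediv_nonneg (le_of_lt hl) (le_of_lt hb)
  split_ifs with hr
  · rcases lt_or_eq_of_le hq with h' | h'
    · omega
    · nlinarith
  · omega

-- ===== VERDICT (by name: the statement is the Claim_ definition above) =====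
theorem resolve_grid_layout_spec : Claim_equal_resolve_grid_layout := by
  intro screen_w screen_h wss _
  unfold Spec_resolve_grid_layout resolve_grid_layout resolve_grid_layout_alt
  simp only []
  set m : Int := if screen_w ≥ screen_h then 3 else 2 with hm
  have hmpos : 0 < m := by rw [hm]; split_ifs <;> omega
  have hl0 : (0 : Int) ≤ (wss.length : Int) := Int.natCast_nonneg _
  generalize hlg : (wss.length : Int) = l at hl0 ⊢
  by_cases hz : l = 0
  · have hc0 : pyCeilDiv 0 m = 0 := by
      rw [pyCeilDiv_eq 0 m hmpos]; simp
    simp [hz, hc0, gridLoop]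
  · rw [if_neg hz]
    have hlpos : 0 < l := lt_of_le_of_ne hl0 (Ne.symm hz)
    have hrows : 0 < pyCeilDiv l m := pyCeilDiv_pos l m hmpos hlpos
    obtain ⟨n, hn⟩ : ∃ n : Nat, pyCeilDiv l m = (n : Int) + 1 := ⟨(pyCeilDiv l m - 1).toNat, by omega⟩
    have htn : (pyCeilDiv l m).toNat = n + 1 := by omega
    rw [htn, loop_eq_bal n l [] hl0, ← hn]
    have hfd : PySem.Int.floordiv l (pyCeilDiv l m) = l / pyCeilDiv l m :=
      PySem.Int.floordiv_eq_ediv_of_pos hrows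
    have hmd : PySem.Int.mod l (pyCeilDiv l m) = l % pyCeilDiv l m :=
      PySem.Int.mod_eq_emod_of_pos hrows
    simp only [List.nil_append, bal]
    rw [show -(PySem.Int.floordiv (-l) m) = pyCeilDiv l m from rfl, hfd, hmd]
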